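-- pv_equiv track=rewrite | github.com/AbdulkadirUgas/ARC | arc_visualizer/deterministic_arc_solver.py | all_subgrid_margin_positions
-- ===== SOURCE A (Python) =====
-- Grid = list[list[int]]
--
-- def shape(grid: Grid) -> tuple[int, int]:
--     return len(grid), len(grid[0]) if grid else 0
--
-- def all_subgrid_margin_positions(inp: Grid, out: Grid) -> list[tuple[int, int, int, int]]:
--     ih, iw = shape(inp)
--     oh, ow = shape(out)
--     matches = []
--     if oh > ih or ow > iw:
--         return matches
--     for r0 in range(ih - oh + 1):
--         for c0 in range(iw - ow + 1):
--             if inp[r0 : r0 + oh] and all(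
--                 inp[r0 + rr][c0 : c0 + ow] == out[rr] for rr in range(oh)
--             ):
--                 matches.append((r0, ih - (r0 + oh), c0, iw - (c0 + ow)))
--     return matches
-- ===== SOURCE B (Python) =====
-- def all_subgrid_margin_positions(inp, out):
--     ih = len(inp)
--     iw = len(inp[0]) if inp else 0
--     oh = len(out)
--     ow = len(out[0]) if out else 0
--     if oh == 0 or oh > ih or ow > iw:
--         return []
--     # intern each distinct output row as a small id
--     rowid = {}
--     for row in out:
--         key = tuple(row)
--         if key not in rowid:
--             rowid[key] = len(rowid)
--     pat = [rowid[tuple(row)] for row in out]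
--     ncols = iw - ow + 1
--     # encode every row window of the input by its id (-1 = matches no output row)
--     code = [[rowid.get(tuple(row[c:c + ow]), -1) for c in range(ncols)] for row in inp]
--     res = []
--     for r0 in range(ih - oh + 1):
--         for c0 in range(ncols):
--             if all(code[r0 + rr][c0] == pat[rr] for rr in range(oh)):
--                 res.append((r0, ih - (r0 + oh), c0, iw - (c0 + ow)))
--     return res
-- ===== Notes on version B (the rewrite author's own statement) =====
-- stated objective: alternative
-- what changed: B interns the distinct output rows into integer ids once, encodes every input row window by its id via one dict lookup, and then matches columns of ids, replacing A's per-position oh*ow subgrid comparison by an oh-long id comparison (O(ih*iw*(oh+ow)) total work instead of O(ih*iw*oh*ow) worst case; A's generator short-circuits, so measured speed depends on match density).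
import Mathlib
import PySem

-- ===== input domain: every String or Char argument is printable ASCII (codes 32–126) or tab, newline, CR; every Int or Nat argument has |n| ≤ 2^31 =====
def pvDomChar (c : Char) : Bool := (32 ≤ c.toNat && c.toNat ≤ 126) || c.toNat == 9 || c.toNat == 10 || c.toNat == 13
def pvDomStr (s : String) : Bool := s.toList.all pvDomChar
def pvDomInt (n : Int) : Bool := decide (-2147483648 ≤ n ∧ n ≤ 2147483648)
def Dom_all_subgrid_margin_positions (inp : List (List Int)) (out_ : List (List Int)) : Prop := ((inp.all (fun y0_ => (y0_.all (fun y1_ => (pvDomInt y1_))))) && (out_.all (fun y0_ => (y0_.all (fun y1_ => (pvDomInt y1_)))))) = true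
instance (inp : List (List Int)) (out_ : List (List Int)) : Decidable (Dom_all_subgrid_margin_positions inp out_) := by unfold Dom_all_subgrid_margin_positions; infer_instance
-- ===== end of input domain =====

-- B replaces A's per-position oh*ow subgrid comparison by interning the output rows
-- into integer ids once, encoding every input row window by its id, and matching
-- id columns (alternative algorithm; same return value).

-- ===== PORT A =====
-- helper 'shape' of A: (len(grid), len(grid[0]) if grid else 0)
def pvShape (g : List (List Int)) : Int × Int :=
  (g.length, if g = [] then 0 else ((PySem.List.pyGetD g 0 []).length : Int))

def all_subgrid_margin_positions (inp : List (List Int)) (out_ : List (List Int)) : List (Int × Int × Int × Int) :=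
  let ih := (pvShape inp).1
  let iw := (pvShape inp).2
  let oh := (pvShape out_).1
  let ow := (pvShape out_).2
  if oh > ih ∨ ow > iw then []
  else
    (PySem.List.pyRange 0 (ih - oh + 1) 1).foldl (fun acc r0 =>
      (PySem.List.pyRange 0 (iw - ow + 1) 1).foldl (fun acc c0 =>
        if (!(PySem.List.slice inp (some r0) (some (r0 + oh))).isEmpty
            && (PySem.List.pyRange 0 oh 1).all (fun rr =>
                 PySem.List.slice (PySem.List.pyGetD inp (r0 + rr) []) (some c0) (some (c0 + ow))
                   == PySem.List.pyGetD out_ rr [])) = true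
        then acc ++ [(r0, ih - (r0 + oh), c0, iw - (c0 + ow))]
        else acc) acc) []

-- ===== PORT B =====
-- B's interning loop: rowid[key] = len(rowid) for each new key
def pvIntern (rows : List (List Int)) : PySem.Dict (List Int) Int :=
  rows.foldl (fun d row => if d.contains row then d else d.insert row (d.size : Int)) PySem.Dict.empty

def all_subgrid_margin_positions_alt (inp : List (List Int)) (out_ : List (List Int)) : List (Int × Int × Int × Int) :=
  let ih : Int := inp.length
  let iw : Int := if inp = [] then 0 else ((PySem.List.pyGetD inp 0 []).length : Int)
  let oh : Int := out_.length
  let ow : Int := if out_ = [] then 0 else ((PySem.List.pyGetD out_ 0 []).length : Int)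
  if oh = 0 ∨ oh > ih ∨ ow > iw then []
  else
    let d := pvIntern out_
    -- pat[rr] = rowid[tuple(out[rr])] (always present; default never used)
    let pat := out_.map (fun row => d.getD row (-1))
    let ncols := iw - ow + 1
    let code := inp.map (fun row =>
      (PySem.List.pyRange 0 ncols 1).map (fun c =>
        d.getD (PySem.List.slice row (some c) (some (c + ow))) (-1)))
    (PySem.List.pyRange 0 (ih - oh + 1) 1).foldl (fun res r0 =>
      (PySem.List.pyRange 0 ncols 1).foldl (fun res c0 =>
        if ((PySem.List.pyRange 0 oh 1).all (fun rr =>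
              PySem.List.pyGetD (PySem.List.pyGetD code (r0 + rr) []) c0 (-2)
                == PySem.List.pyGetD pat rr (-2))) = true
        then res ++ [(r0, ih - (r0 + oh), c0, iw - (c0 + ow))]
        else res) res) []

-- ===== PRECONDITION & SPEC =====
def Spec_all_subgrid_margin_positions (inp : List (List Int)) (out_ : List (List Int)) (out : List (Int × Int × Int × Int)) : Prop := out = all_subgrid_margin_positions_alt inp out_
instance (inp : List (List Int)) (out_ : List (List Int)) (out : List (Int × Int × Int × Int)) : Decidable (Spec_all_subgrid_margin_positions inp out_ out) := by unfold Spec_all_subgrid_margin_positions; infer_instance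

-- ===== CLAIM (what is proved, stated in full; the proofs are below) =====
def Claim_equal_all_subgrid_margin_positions : Prop := ∀ (inp : List (List Int)) (out_ : List (List Int)), Dom_all_subgrid_margin_positions inp out_ → Spec_all_subgrid_margin_positions inp out_ (all_subgrid_margin_positions inp out_)


-- ===== LEMMAS AND PROOFS =====

-- fold that never changes its accumulator
theorem pv_foldl_keep {α β : Type} (l : List β) (a : α) :
    l.foldl (fun a _ => a) a = a := by
  induction l generalizing a with
  | nil => rfl
  | cons x xs ih => simp only [List.foldl_cons]; exact ih a

theorem pv_all_congr_mem {α : Type} (l : List α) (f g : α → Bool)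
    (h : ∀ x ∈ l, f x = g x) : l.all f = l.all g := by
  induction l with
  | nil => rfl
  | cons x xs ih =>
    simp only [List.all_cons]
    rw [h x (by simp), ih (fun y hy => h y (by simp [hy]))]

-- the interning fold from a given dict (proof-side view of pvIntern)
def pvInternFrom (rows : List (List Int)) (d : PySem.Dict (List Int) Int) : PySem.Dict (List Int) Int :=
  rows.foldl (fun d row => if d.contains row then d else d.insert row (d.size : Int)) d

theorem pvIntern_eq_from (rows : List (List Int)) :
    pvIntern rows = pvInternFrom rows PySem.Dict.empty := rfl

theorem pvIntern_fold (rows : List (List Int)) :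
    ∀ d : PySem.Dict (List Int) Int,
    (∀ k v, d.get? k = some v → 0 ≤ v ∧ v < (d.size : Int)) →
    (∀ k1 k2 v, d.get? k1 = some v → d.get? k2 = some v → k1 = k2) →
    (∀ k v, (pvInternFrom rows d).get? k = some v → 0 ≤ v ∧ v < ((pvInternFrom rows d).size : Int)) ∧
    (∀ k1 k2 v, (pvInternFrom rows d).get? k1 = some v → (pvInternFrom rows d).get? k2 = some v → k1 = k2) ∧
    (∀ k, d.contains k = true → (pvInternFrom rows d).contains k = true) ∧
    (∀ row ∈ rows, (pvInternFrom rows d).contains row = true) := by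
  induction rows with
  | nil =>
    intro d hInv hInj
    exact ⟨hInv, hInj, fun k hk => hk, by simp⟩
  | cons row rest ih =>
    intro d hInv hInj
    have hfold : pvInternFrom (row :: rest) d
        = pvInternFrom rest (if d.contains row then d else d.insert row (d.size : Int)) := rfl
    by_cases hc : d.contains row = true
    · rw [hfold, if_pos hc]
      obtain ⟨h1, h2, h3, h4⟩ := ih d hInv hInj
      refine ⟨h1, h2, h3, ?_⟩
      intro r hr
      rcases List.mem_cons.mp hr with hr | hr
      · exact hr ▸ h3 row hc
      · exact h4 r hr
    · rw [hfold, if_neg hc]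
      set d1 := d.insert row (d.size : Int) with hd1
      have hnone : d.get? row = none := (PySem.Dict.get?_eq_none_iff_contains d row).mpr (by simpa using hc)
      have hsize : d1.size = d.size + 1 := by
        rw [hd1, PySem.Dict.size_insert, if_neg hc]
      have hInv1 : ∀ k v, d1.get? k = some v → 0 ≤ v ∧ v < (d1.size : Int) := by
        intro k v hk
        by_cases hkr : k = row
        · subst hkr
          rw [hd1, PySem.Dict.get?_insert_self] at hk
          obtain rfl : (d.size : Int) = v := by exact Option.some.inj hk
          rw [hsize]
          refine ⟨by positivity, ?_⟩
          push_cast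
          omega
        · rw [hd1, PySem.Dict.get?_insert_of_ne _ _ hkr] at hk
          obtain ⟨hv0, hv1⟩ := hInv k v hk
          refine ⟨hv0, ?_⟩
          rw [hsize]
          push_cast
          omega
      have hInj1 : ∀ k1 k2 v, d1.get? k1 = some v → d1.get? k2 = some v → k1 = k2 := by
        intro k1 k2 v h1 h2
        by_cases hk1 : k1 = row <;> by_cases hk2 : k2 = row
        · rw [hk1, hk2]
        · subst hk1
          rw [hd1, PySem.Dict.get?_insert_self] at h1
          rw [hd1, PySem.Dict.get?_insert_of_ne _ _ hk2] at h2
          obtain rfl : (d.size : Int) = v := Option.some.inj h1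
          have := (hInv k2 _ h2).2
          omega
        · subst hk2
          rw [hd1, PySem.Dict.get?_insert_self] at h2
          rw [hd1, PySem.Dict.get?_insert_of_ne _ _ hk1] at h1
          obtain rfl : (d.size : Int) = v := Option.some.inj h2
          have := (hInv k1 _ h1).2
          omega
        · rw [hd1, PySem.Dict.get?_insert_of_ne _ _ hk1] at h1
          rw [hd1, PySem.Dict.get?_insert_of_ne _ _ hk2] at h2
          exact hInj k1 k2 v h1 h2
      obtain ⟨h1, h2, h3, h4⟩ := ih d1 hInv1 hInj1
      refine ⟨h1, h2, ?_, ?_⟩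
      · intro k hk
        apply h3
        rw [hd1, PySem.Dict.contains_insert]
        simp [hk]
      · intro r hr
        rcases List.mem_cons.mp hr with hr | hr
        · subst hr
          apply h3
          rw [hd1, PySem.Dict.contains_insert]
          simp
        · exact h4 r hr

-- lookups in the interning dict agree exactly on equal keys (for keys of out rows)
theorem pvIntern_getD_eq (rows : List (List Int)) (w row : List Int) (hrow : row ∈ rows) :
    (((pvIntern rows).getD w (-1)) == ((pvIntern rows).getD row (-1))) = (w == row) := by
  obtain ⟨hInv, hInj, -, hmem⟩ :=
    pvIntern_fold rows PySem.Dict.empty (by simp) (by simp)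
  rw [pvIntern_eq_from]
  set d := pvInternFrom rows PySem.Dict.empty with hd
  have hc : d.contains row = true := hmem row hrow
  obtain ⟨v, hv⟩ : ∃ v, d.get? row = some v := by
    rcases h : d.get? row with _ | v
    · rw [PySem.Dict.get?_eq_none_iff_contains] at h
      rw [h] at hc; cases hc
    · exact ⟨v, rfl⟩
  have hv0 : 0 ≤ v := (hInv row v hv).1
  by_cases hw : w = row
  · subst hw; simp
  · have hne : d.getD w (-1) ≠ d.getD row (-1) := by
      rw [PySem.Dict.getD_eq_get?_getD, PySem.Dict.getD_eq_get?_getD, hv]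
      rcases h2 : d.get? w with _ | u
      · simp only [Option.getD_none, Option.getD_some]
        omega
      · simp only [Option.getD_some]
        intro he
        exact hw (hInj w row v (he ▸ h2) hv)
    rw [beq_eq_false_iff_ne.mpr hne, beq_eq_false_iff_ne.mpr hw]

-- pointwise equality of the two per-position match tests
theorem pv_cond_eq (inp out_ : List (List Int)) (ow ncols r0 c0 : Int)
    (hr0 : 0 ≤ r0) (hr1 : r0 + (out_.length : Int) ≤ (inp.length : Int))
    (hc0 : 0 ≤ c0) (hc1 : c0 < ncols)
    (hoh : out_ ≠ []) :
    (!(PySem.List.slice inp (some r0) (some (r0 + (out_.length : Int)))).isEmpty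
      && (PySem.List.pyRange 0 (out_.length : Int) 1).all (fun rr =>
           PySem.List.slice (PySem.List.pyGetD inp (r0 + rr) []) (some c0) (some (c0 + ow))
             == PySem.List.pyGetD out_ rr []))
    = (PySem.List.pyRange 0 (out_.length : Int) 1).all (fun rr =>
         PySem.List.pyGetD (PySem.List.pyGetD
             (inp.map (fun row => (PySem.List.pyRange 0 ncols 1).map (fun c =>
                (pvIntern out_).getD (PySem.List.slice row (some c) (some (c + ow))) (-1))))
             (r0 + rr) []) c0 (-2)
           == PySem.List.pyGetD (out_.map (fun row => (pvIntern out_).getD row (-1))) rr (-2)) := by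
  have hlen1 : 1 ≤ out_.length := List.length_pos_iff.mpr hoh
  have hslice : (PySem.List.slice inp (some r0) (some (r0 + (out_.length : Int)))).isEmpty = false := by
    rw [PySem.List.slice_toNat inp hr0 (by omega)]
    rw [List.isEmpty_eq_false_iff, ← List.length_pos_iff, List.length_take, List.length_drop]
    omega
  rw [hslice]
  simp only [Bool.not_false, Bool.true_and]
  apply pv_all_congr_mem
  intro rr hrr
  obtain ⟨hrr0, hrr1⟩ := PySem.List.mem_pyRange_one.mp hrr
  have hidx0 : 0 ≤ r0 + rr := by omega
  have hidx1 : r0 + rr < (inp.length : Int) := by omega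
  rw [PySem.List.pyGetD_eq_getElem _ _ hidx0 hidx1,
      PySem.List.pyGetD_eq_getElem (inp.map _) _ hidx0 (by simpa using hidx1),
      List.getElem_map,
      PySem.List.pyGetD_map_pyRange_of_nonneg _ ncols c0 _ hc0 hc1,
      PySem.List.pyGetD_eq_getElem _ _ hrr0 hrr1,
      PySem.List.pyGetD_eq_getElem (out_.map _) _ hrr0 (by simpa using hrr1),
      List.getElem_map]
  exact (pvIntern_getD_eq out_ _ _ (List.getElem_mem _)).symm

theorem pv_main (inp : List (List Int)) (out_ : List (List Int)) :
    all_subgrid_margin_positions inp out_ = all_subgrid_margin_positions_alt inp out_ := by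
  rcases hout : out_ with _ | ⟨orow, orest⟩
  · -- empty pattern: A's guard 'inp[r0:r0]' is always empty, B returns [] up front
    simp only [all_subgrid_margin_positions, all_subgrid_margin_positions_alt, pvShape]
    norm_num
    intro _
    rw [PySem.List.foldl_congr_mem'
          (g := fun (acc : List (Int × Int × Int × Int)) _ => acc)]
    · exact pv_foldl_keep _ _
    · intro r0 hr0 acc
      obtain ⟨h0, -⟩ := PySem.List.mem_pyRange_one.mp hr0
      rw [PySem.List.foldl_congr_mem'
            (g := fun (acc : List (Int × Int × Int × Int)) _ => acc)]
      · exact pv_foldl_keep _ _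
      · intro c0 _ acc'
        have hsl : PySem.List.slice inp (some r0) (some r0) = [] := by
          rw [PySem.List.slice_toNat inp h0 h0]
          simp
        simp [hsl]
  · rw [← hout]
    have hoh : out_ ≠ [] := by rw [hout]; exact List.cons_ne_nil _ _
    simp only [all_subgrid_margin_positions, all_subgrid_margin_positions_alt, pvShape]
    have hohz : ¬ ((out_.length : Int) = 0) := by
      simp [List.length_eq_zero_iff, hoh]
    by_cases hg : ((out_.length : Int) > (inp.length : Int) ∨
        (if out_ = [] then 0 else ((PySem.List.pyGetD out_ 0 []).length : Int)) >
        (if inp = [] then 0 else ((PySem.List.pyGetD inp 0 []).length : Int)))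
    · rw [if_pos hg]
      rw [if_pos (show ((out_.length : Int) = 0 ∨ (out_.length : Int) > (inp.length : Int) ∨
            (if out_ = [] then 0 else ((PySem.List.pyGetD out_ 0 []).length : Int)) >
            (if inp = [] then 0 else ((PySem.List.pyGetD inp 0 []).length : Int))) by tauto)]
    · rw [if_neg hg]
      rw [if_neg (show ¬ ((out_.length : Int) = 0 ∨ (out_.length : Int) > (inp.length : Int) ∨
            (if out_ = [] then 0 else ((PySem.List.pyGetD out_ 0 []).length : Int)) >
            (if inp = [] then 0 else ((PySem.List.pyGetD inp 0 []).length : Int))) by tauto)]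
      rw [not_or] at hg
      obtain ⟨hg1, hg2⟩ := hg
      rw [not_lt] at hg1 hg2
      apply PySem.List.foldl_congr_mem'
      intro r0 hr0 acc
      obtain ⟨hr00, hr01⟩ := PySem.List.mem_pyRange_one.mp hr0
      apply PySem.List.foldl_congr_mem'
      intro c0 hc0 acc'
      obtain ⟨hc00, hc01⟩ := PySem.List.mem_pyRange_one.mp hc0
      rw [pv_cond_eq inp out_ _ _ r0 c0 hr00 (by omega) hc00 (by omega) hoh]

-- ===== VERDICT (by name: the statement is the Claim_ definition above) =====
theorem all_subgrid_margin_positions_spec : Claim_equal_all_subgrid_margin_positions := by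
  intro inp out_ _
  unfold Spec_all_subgrid_margin_positions
  exact pv_main inp out_
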